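-- pv_equiv track=rewrite | github.com/StarsExpress/LeetCode-Repository | bit_manipulation/chalkboard_xor.py | determine_winner
-- ===== SOURCE A (Python) =====
-- def determine_winner(numbers: list[int]) -> bool:  # LeetCode Q.810.
--     xor_value = 0
--     numbers2counts, distinct_numbers = dict(), []
--     for number in numbers:
--         xor_value ^= number
--         if number not in numbers2counts.keys():
--             distinct_numbers.append(number)
--             numbers2counts.update({number: 0})
--         numbers2counts[number] += 1
--
--     total_finished_plays = 0  # When total plays are even, it's Alice's turn.
--     removed_idx = 0
--     while distinct_numbers:
--         if xor_value == 0: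
--             return True if total_finished_plays % 2 == 0 else False
--
--         removed_idx -= removed_idx  # Reset to the default 0.
--         if distinct_numbers[0] == xor_value and len(distinct_numbers) > 1:
--             removed_idx += 1  # Must and can switch to another removal choice.
--
--         removed_num = distinct_numbers[removed_idx]
--         numbers2counts[removed_num] -= 1
--         if numbers2counts[removed_num] == 0:
--             distinct_numbers.pop(removed_idx)
--
--         xor_value ^= removed_num
--         total_finished_plays += 1
--
--     return True if total_finished_plays % 2 == 0 else False
-- ===== SOURCE B (Python) =====
-- def determine_winner(numbers: list[int]) -> bool:  # LeetCode Q.810.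
--     # Closed form: Alice wins iff the xor of all numbers is 0 or the count is even.
--     xor_all = 0
--     for number in numbers:
--         xor_all ^= number
--     return xor_all == 0 or len(numbers) % 2 == 0
-- ===== Notes on version B (the rewrite author's own statement) =====
-- stated objective: faster
-- what changed: Replaces A's turn-by-turn greedy simulation of the whole game (dict of counts, distinct list, one removal per iteration) with the closed-form game-theory result: the first player wins iff the xor of all numbers is 0 or the list length is even.
import Mathlib
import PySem

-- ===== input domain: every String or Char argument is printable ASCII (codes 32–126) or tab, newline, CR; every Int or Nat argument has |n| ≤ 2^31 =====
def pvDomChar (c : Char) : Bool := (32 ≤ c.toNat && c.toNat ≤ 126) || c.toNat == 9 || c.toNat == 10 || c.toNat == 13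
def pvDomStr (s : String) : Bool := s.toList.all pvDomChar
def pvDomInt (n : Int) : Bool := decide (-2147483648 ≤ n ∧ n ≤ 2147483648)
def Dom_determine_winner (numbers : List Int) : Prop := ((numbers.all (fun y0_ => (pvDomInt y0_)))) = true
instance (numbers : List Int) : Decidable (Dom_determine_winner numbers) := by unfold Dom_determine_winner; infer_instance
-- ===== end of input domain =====

-- B replaces A's turn-by-turn greedy game simulation with the closed form
-- "xor of all numbers = 0 or even length" (asymptotically faster).


-- ===== PORT A =====
-- body of A's first for-loop: update running xor, counts dict, distinct list for one number
def dwStep (s : Int × PySem.Dict Int Int × List Int) (n : Int) : Int × PySem.Dict Int Int × List Int :=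
  let x := PySem.Int.bxor s.1 n
  let cd := if s.2.1.contains n then (s.2.1, s.2.2) else (s.2.1.insert n 0, s.2.2 ++ [n])
  (x, cd.1.modify n 0 (· + 1), cd.2)

-- A's while-loop; fuel bounds the total remaining multiplicity (numbers.length suffices,
-- proved below), so the 0-fuel branch is never reached from determine_winner.
-- `c.modify r 0 (· - 1)` ports `numbers2counts[removed_num] -= 1` (the key is always present there).
def dwLoop (fuel : Nat) (d : List Int) (c : PySem.Dict Int Int) (x plays : Int) : Bool :=
  match fuel, d with
  | _, [] => decide (PySem.Int.mod plays 2 = 0)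
  | 0, _ :: _ => false
  | fuel + 1, h :: t =>
    if x = 0 then decide (PySem.Int.mod plays 2 = 0)
    else
      let idx : Int := if h = x ∧ t ≠ [] then 1 else 0
      let r : Int := PySem.List.pyGetD (h :: t) idx 0
      let c2 := c.modify r 0 (· - 1)
      let d2 := if c2.getD r 0 = 0 then (((PySem.List.pop? (h :: t) idx).map (·.2)).getD (h :: t)) else h :: t
      dwLoop fuel d2 c2 (PySem.Int.bxor x r) (plays + 1)

def determine_winner (numbers : List Int) : Bool :=
  let s := numbers.foldl dwStep (0, PySem.Dict.empty, [])
  dwLoop numbers.length s.2.2 s.2.1 s.1 0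

-- ===== PORT B =====
def determine_winner_alt (numbers : List Int) : Bool :=
  decide (numbers.foldl PySem.Int.bxor 0 = 0) || decide (PySem.Int.mod (numbers.length : Int) 2 = 0)

-- ===== PRECONDITION & SPEC =====
def Spec_determine_winner (numbers : List Int) (out : Bool) : Prop := out = determine_winner_alt numbers
instance (numbers : List Int) (out : Bool) : Decidable (Spec_determine_winner numbers out) := by unfold Spec_determine_winner; infer_instance

-- ===== CLAIM (what is proved, stated in full; the proofs are below) =====
def Claim_equal_determine_winner : Prop := ∀ (numbers : List Int), Dom_determine_winner numbers → Spec_determine_winner numbers (determine_winner numbers)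

-- ===== LEMMAS AND PROOFS =====

-- -------- xor algebra for PySem.Int.bxor --------
def pvS (a : Int) : Bool := decide (a < 0)
def pvN (a : Int) : Nat := if 0 ≤ a then a.toNat else (-a).toNat - 1
def pvDec (s : Bool) (n : Nat) : Int := if s then -(n : Int) - 1 else (n : Int)

theorem pvBxor_eq (a b : Int) :
    PySem.Int.bxor a b = pvDec (xor (pvS a) (pvS b)) ((pvN a) ^^^ (pvN b)) := by
  simp only [PySem.Int.bxor, pvDec, pvS, pvN]
  split_ifs <;> simp_all <;> omega

theorem pvS_dec (s : Bool) (n : Nat) : pvS (pvDec s n) = s := by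
  cases s
  · simp [pvS, pvDec]
  · simp [pvS, pvDec]
    omega

theorem pvN_dec (s : Bool) (n : Nat) : pvN (pvDec s n) = n := by
  cases s
  · simp only [pvN, pvDec, Bool.false_eq_true, if_false]
    split_ifs <;> omega
  · simp only [pvN, pvDec, if_true]
    split_ifs <;> omega

theorem pvBxor_assoc (a b c : Int) :
    PySem.Int.bxor (PySem.Int.bxor a b) c = PySem.Int.bxor a (PySem.Int.bxor b c) := by
  rw [pvBxor_eq a b, pvBxor_eq b c, pvBxor_eq _ c, pvBxor_eq a _, pvS_dec, pvN_dec, pvS_dec, pvN_dec,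
    Bool.xor_assoc, Nat.xor_assoc]

theorem pvBxor_zero_left (a : Int) : PySem.Int.bxor 0 a = a := by
  rw [PySem.Int.bxor_comm]; exact PySem.Int.bxor_zero a

theorem pvBxor_left_comm (a b c : Int) :
    PySem.Int.bxor a (PySem.Int.bxor b c) = PySem.Int.bxor b (PySem.Int.bxor a c) := by
  rw [← pvBxor_assoc, PySem.Int.bxor_comm a b, pvBxor_assoc]

theorem pvBxor_cancel (a b : Int) : PySem.Int.bxor a (PySem.Int.bxor a b) = b := by
  rw [← pvBxor_assoc, PySem.Int.bxor_self, pvBxor_zero_left]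

theorem pvBxor_eq_zero_iff (a b : Int) : PySem.Int.bxor a b = 0 ↔ a = b := by
  constructor
  · intro h
    have h2 : PySem.Int.bxor (PySem.Int.bxor a b) b = PySem.Int.bxor 0 b := by rw [h]
    rwa [pvBxor_assoc, PySem.Int.bxor_self, PySem.Int.bxor_zero, pvBxor_zero_left] at h2
  · intro h; rw [h]; exact PySem.Int.bxor_self b

-- -------- xor and total of a (distinct list, count function) state --------
def pvContrib (f : Int → Int) (v : Int) : Int := if PySem.Int.mod (f v) 2 = 1 then v else 0
def pvXorM (d : List Int) (f : Int → Int) : Int := (d.map (pvContrib f)).foldr PySem.Int.bxor 0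
def pvTot (d : List Int) (f : Int → Int) : Int := (d.map f).sum

theorem pvXorM_nil (f : Int → Int) : pvXorM [] f = 0 := rfl

theorem pvXorM_cons (v : Int) (d : List Int) (f : Int → Int) :
    pvXorM (v :: d) f = PySem.Int.bxor (pvContrib f v) (pvXorM d f) := rfl

theorem pvXorM_append (d1 d2 : List Int) (f : Int → Int) :
    pvXorM (d1 ++ d2) f = PySem.Int.bxor (pvXorM d1 f) (pvXorM d2 f) := by
  induction d1 with
  | nil => simp [pvXorM_nil, pvBxor_zero_left]
  | cons h t ih => simp only [List.cons_append, pvXorM_cons, ih, pvBxor_assoc]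

theorem pvXorM_congr (d : List Int) (f g : Int → Int) (h : ∀ v ∈ d, f v = g v) :
    pvXorM d f = pvXorM d g := by
  unfold pvXorM
  congr 1
  exact List.map_congr_left (fun v hv => by simp [pvContrib, h v hv])

theorem pvTot_nil (f : Int → Int) : pvTot [] f = 0 := rfl

theorem pvTot_cons (v : Int) (d : List Int) (f : Int → Int) :
    pvTot (v :: d) f = f v + pvTot d f := by simp [pvTot]

theorem pvTot_append (d1 d2 : List Int) (f : Int → Int) :
    pvTot (d1 ++ d2) f = pvTot d1 f + pvTot d2 f := by simp [pvTot]

theorem pvTot_congr (d : List Int) (f g : Int → Int) (h : ∀ v ∈ d, f v = g v) :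
    pvTot d f = pvTot d g := by
  unfold pvTot; congr 1; exact List.map_congr_left h

theorem pvTot_pos (d : List Int) (f : Int → Int) (h : ∀ v ∈ d, 1 ≤ f v) :
    (d.length : Int) ≤ pvTot d f := by
  induction d with
  | nil => simp [pvTot]
  | cons v t ih =>
    rw [pvTot_cons]
    have h1 := h v (by simp)
    have h2 := ih (fun w hw => h w (by simp [hw]))
    simp only [List.length_cons]
    push_cast
    omega

-- parity helpers
theorem pvMod2_odd (a : Int) (h : PySem.Int.mod a 2 = 1) : ¬ (2 ∣ a) := by
  rw [show PySem.Int.mod a 2 = a % 2 from PySem.Int.mod_eq_emod_of_pos (by norm_num)] at h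
  omega

theorem pvContrib_flip_up (a n : Int) :
    (if PySem.Int.mod (a + 1) 2 = 1 then n else 0)
      = PySem.Int.bxor (if PySem.Int.mod a 2 = 1 then n else 0) n := by
  rw [show PySem.Int.mod (a + 1) 2 = (a + 1) % 2 from PySem.Int.mod_eq_emod_of_pos (by norm_num),
      show PySem.Int.mod a 2 = a % 2 from PySem.Int.mod_eq_emod_of_pos (by norm_num)]
  by_cases h : a % 2 = 1
  · have h2 : ¬ ((a + 1) % 2 = 1) := by omega
    simp [h, h2, PySem.Int.bxor_self]
  · have h2 : (a + 1) % 2 = 1 := by omega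
    simp [h, h2, pvBxor_zero_left]

theorem pvContrib_flip_down (a n : Int) :
    (if PySem.Int.mod (a - 1) 2 = 1 then n else 0)
      = PySem.Int.bxor (if PySem.Int.mod a 2 = 1 then n else 0) n := by
  rw [show PySem.Int.mod (a - 1) 2 = (a - 1) % 2 from PySem.Int.mod_eq_emod_of_pos (by norm_num),
      show PySem.Int.mod a 2 = a % 2 from PySem.Int.mod_eq_emod_of_pos (by norm_num)]
  by_cases h : a % 2 = 1
  · have h2 : ¬ ((a - 1) % 2 = 1) := by omega
    simp [h, h2, PySem.Int.bxor_self]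
  · have h2 : (a - 1) % 2 = 1 := by omega
    simp [h, h2, pvBxor_zero_left]

-- a removal step of A's while loop: count of r drops by one, r is popped if its count hits 0
theorem pvRemoval (c : PySem.Dict Int Int) (r : Int) (d1 d2 : List Int)
    (hnd : (d1 ++ r :: d2).Nodup) (hpos : ∀ v ∈ d1 ++ r :: d2, 1 ≤ c.getD v 0) :
    (if (c.modify r 0 (· - 1)).getD r 0 = 0 then d1 ++ d2 else d1 ++ r :: d2).Nodup ∧
    (∀ v ∈ (if (c.modify r 0 (· - 1)).getD r 0 = 0 then d1 ++ d2 else d1 ++ r :: d2),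
        1 ≤ (c.modify r 0 (· - 1)).getD v 0) ∧
    pvXorM (if (c.modify r 0 (· - 1)).getD r 0 = 0 then d1 ++ d2 else d1 ++ r :: d2)
        (fun v => (c.modify r 0 (· - 1)).getD v 0)
      = PySem.Int.bxor (pvXorM (d1 ++ r :: d2) (fun v => c.getD v 0)) r ∧
    pvTot (if (c.modify r 0 (· - 1)).getD r 0 = 0 then d1 ++ d2 else d1 ++ r :: d2)
        (fun v => (c.modify r 0 (· - 1)).getD v 0)
      = pvTot (d1 ++ r :: d2) (fun v => c.getD v 0) - 1 := by
  have hndsplit := hnd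
  rw [List.nodup_append] at hndsplit
  obtain ⟨hnd1, hnd2c, hdisj⟩ := hndsplit
  have hr1 : r ∉ d1 := fun h => hdisj r h r (by simp) rfl
  have hr2 : r ∉ d2 := (List.nodup_cons.mp hnd2c).1
  have hgAll : ∀ v, (c.modify r 0 (· - 1)).getD v 0
      = if v = r then c.getD r 0 - 1 else c.getD v 0 := by
    intro v
    rw [PySem.Dict.getD_modify]
  have hgr : (c.modify r 0 (· - 1)).getD r 0 = c.getD r 0 - 1 := by rw [hgAll, if_pos rfl]
  have hgne : ∀ v, v ≠ r → (c.modify r 0 (· - 1)).getD v 0 = c.getD v 0 := by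
    intro v hv
    rw [hgAll, if_neg hv]
  have hposr : 1 ≤ c.getD r 0 := hpos r (by simp)
  have hcongr1X : pvXorM d1 (fun v => (c.modify r 0 (· - 1)).getD v 0) = pvXorM d1 (fun v => c.getD v 0) :=
    pvXorM_congr _ _ _ (fun v hv => hgne v (fun h => hr1 (show r ∈ d1 from h ▸ hv)))
  have hcongr2X : pvXorM d2 (fun v => (c.modify r 0 (· - 1)).getD v 0) = pvXorM d2 (fun v => c.getD v 0) :=
    pvXorM_congr _ _ _ (fun v hv => hgne v (fun h => hr2 (show r ∈ d2 from h ▸ hv)))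
  have hcongr1T : pvTot d1 (fun v => (c.modify r 0 (· - 1)).getD v 0) = pvTot d1 (fun v => c.getD v 0) :=
    pvTot_congr _ _ _ (fun v hv => hgne v (fun h => hr1 (show r ∈ d1 from h ▸ hv)))
  have hcongr2T : pvTot d2 (fun v => (c.modify r 0 (· - 1)).getD v 0) = pvTot d2 (fun v => c.getD v 0) :=
    pvTot_congr _ _ _ (fun v hv => hgne v (fun h => hr2 (show r ∈ d2 from h ▸ hv)))
  by_cases h0 : (c.modify r 0 (· - 1)).getD r 0 = 0
  · -- r is popped: its count was 1, so its old contribution was r itself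
    have hcnt : c.getD r 0 = 1 := by omega
    have hm1 : PySem.Int.mod (1 : Int) 2 = 1 := by decide
    have hcontr : pvContrib (fun v => c.getD v 0) r = r := by
      simp [pvContrib, hcnt, hm1]
    simp only [h0, if_true]
    refine ⟨?_, ?_, ?_, ?_⟩
    · rw [List.nodup_append]
      exact ⟨hnd1, (List.nodup_cons.mp hnd2c).2, fun a ha b hb => hdisj a ha b (by simp [hb])⟩
    · intro v hv
      have hvr : v ≠ r := by
        rintro rfl
        rcases List.mem_append.mp hv with h | h
        exacts [hr1 h, hr2 h]
      rw [hgne v hvr]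
      exact hpos v (by rcases List.mem_append.mp hv with h | h <;> simp [h])
    · rw [pvXorM_append, pvXorM_append, pvXorM_cons, hcongr1X, hcongr2X, hcontr]
      simp only [pvBxor_assoc, pvBxor_left_comm, PySem.Int.bxor_comm, pvBxor_cancel,
        PySem.Int.bxor_self, PySem.Int.bxor_zero, pvBxor_zero_left]
    · rw [pvTot_append, pvTot_append, pvTot_cons, hcongr1T, hcongr2T, hcnt]
      ring
  · -- r stays: its count parity flips
    have hflip : pvContrib (fun v => (c.modify r 0 (· - 1)).getD v 0) r
        = PySem.Int.bxor (pvContrib (fun v => c.getD v 0) r) r := by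
      simp only [pvContrib, hgr]
      exact pvContrib_flip_down (c.getD r 0) r
    simp only [h0, if_false]
    refine ⟨hnd, ?_, ?_, ?_⟩
    · intro v hv
      by_cases hvr : v = r
      · subst hvr; omega
      · rw [hgne v hvr]; exact hpos v hv
    · rw [pvXorM_append, pvXorM_append, pvXorM_cons, pvXorM_cons, hcongr1X, hcongr2X, hflip]
      simp only [pvBxor_assoc, pvBxor_left_comm, PySem.Int.bxor_comm, pvBxor_cancel,
        PySem.Int.bxor_self, PySem.Int.bxor_zero, pvBxor_zero_left]
    · rw [pvTot_append, pvTot_append, pvTot_cons, pvTot_cons, hcongr1T, hcongr2T, hgr]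
      ring

-- the bookkeeping of one loop iteration rewritten into the closed form's parity
theorem pvParity_step (x x' T p : Int) (hx : ¬ x = 0) (hkey : x' = 0 → ¬ 2 ∣ T) :
    (decide (x' = 0 ∨ 2 ∣ (T - 1)) == decide (PySem.Int.mod (p + 1) 2 = 0))
      = (decide (x = 0 ∨ 2 ∣ T) == decide (PySem.Int.mod p 2 = 0)) := by
  rw [show PySem.Int.mod (p + 1) 2 = (p + 1) % 2 from PySem.Int.mod_eq_emod_of_pos (by norm_num),
      show PySem.Int.mod p 2 = p % 2 from PySem.Int.mod_eq_emod_of_pos (by norm_num)]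
  by_cases hx' : x' = 0
  · have h1 : ¬ 2 ∣ T := hkey hx'
    have h2 : 2 ∣ (T - 1) := by omega
    by_cases hp : p % 2 = 0
    · have h3 : ¬ ((p + 1) % 2 = 0) := by omega
      simp [hx', hx, h1, h2, hp, h3]
    · have h3 : (p + 1) % 2 = 0 := by omega
      simp [hx', hx, h1, h2, hp, h3]
  · by_cases hT2 : 2 ∣ T
    · have h2 : ¬ 2 ∣ (T - 1) := by omega
      by_cases hp : p % 2 = 0
      · have h3 : ¬ ((p + 1) % 2 = 0) := by omega
        simp [hx', hx, hT2, h2, hp, h3]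
      · have h3 : (p + 1) % 2 = 0 := by omega
        simp [hx', hx, hT2, h2, hp, h3]
    · have h2 : 2 ∣ (T - 1) := by omega
      by_cases hp : p % 2 = 0
      · have h3 : ¬ ((p + 1) % 2 = 0) := by omega
        simp [hx', hx, hT2, h2, hp, h3]
      · have h3 : (p + 1) % 2 = 0 := by omega
        simp [hx', hx, hT2, h2, hp, h3]

-- unfolding one iteration of the while loop, removal index 1
theorem dwLoop_step1 (fuel : Nat) (h h2 : Int) (t2 : List Int) (c : PySem.Dict Int Int) (x p : Int)
    (hx0 : ¬ x = 0) (hhx : h = x) :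
    dwLoop (fuel + 1) (h :: h2 :: t2) c x p
      = dwLoop fuel (if (c.modify h2 0 (· - 1)).getD h2 0 = 0 then h :: t2 else h :: h2 :: t2)
          (c.modify h2 0 (· - 1)) (PySem.Int.bxor x h2) (p + 1) := by
  have hr : PySem.List.pyGetD (h :: h2 :: t2) (1 : Int) 0 = h2 := by
    rw [PySem.List.pyGetD_eq_getElem (h :: h2 :: t2) 0 (by norm_num) (by simp)]
    simp
  have hpop : PySem.List.pop? (h :: h2 :: t2) (1 : Int) = some (h2, h :: t2) := by
    rw [show (1 : Int) = ((1 : Nat) : Int) from rfl, PySem.List.pop?_natCast _ 1 (by simp)]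
    simp
  have hcond : h = x ∧ h2 :: t2 ≠ [] := ⟨hhx, by simp⟩
  simp only [dwLoop, if_neg hx0, if_pos hcond, hr, hpop, Option.map_some, Option.getD_some]

-- unfolding one iteration of the while loop, removal index 0
theorem dwLoop_step0 (fuel : Nat) (h : Int) (t : List Int) (c : PySem.Dict Int Int) (x p : Int)
    (hx0 : ¬ x = 0) (hns : ¬ (h = x ∧ t ≠ [])) :
    dwLoop (fuel + 1) (h :: t) c x p
      = dwLoop fuel (if (c.modify h 0 (· - 1)).getD h 0 = 0 then t else h :: t)
          (c.modify h 0 (· - 1)) (PySem.Int.bxor x h) (p + 1) := by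
  have hr : PySem.List.pyGetD (h :: t) (0 : Int) 0 = h := PySem.List.pyGetD_zero_cons h t 0
  have hpop : PySem.List.pop? (h :: t) (0 : Int) = some (h, t) := PySem.List.pop?_zero_cons h t
  simp only [dwLoop, if_neg hx0, if_neg hns, hr, hpop, Option.map_some, Option.getD_some]

-- -------- the while loop computes the closed form --------
theorem dwLoop_spec : ∀ (fuel : Nat) (d : List Int) (c : PySem.Dict Int Int) (x p : Int),
    d.Nodup → (∀ v ∈ d, 1 ≤ c.getD v 0) →
    x = pvXorM d (fun v => c.getD v 0) →
    pvTot d (fun v => c.getD v 0) ≤ (fuel : Int) →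
    dwLoop fuel d c x p
      = (decide (x = 0 ∨ 2 ∣ pvTot d (fun v => c.getD v 0)) == decide (PySem.Int.mod p 2 = 0)) := by
  intro fuel
  induction fuel with
  | zero =>
    intro d c x p hnd hpos hx hfuel
    cases d with
    | nil => simp [dwLoop, hx, pvXorM_nil, pvTot]
    | cons h t =>
      exfalso
      have := pvTot_pos (h :: t) (fun v => c.getD v 0) hpos
      simp only [List.length_cons, Nat.cast_zero] at this hfuel
      push_cast at this
      omega
  | succ fuel ih =>
    intro d c x p hnd hpos hx hfuel
    cases d with
    | nil => simp [dwLoop, hx, pvXorM_nil, pvTot]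
    | cons h t =>
      by_cases hx0 : x = 0
      · simp [dwLoop, hx0]
      · by_cases hsw : h = x ∧ t ≠ []
        · -- removed_idx = 1: the second distinct number is removed
          obtain ⟨hhx, hte⟩ := hsw
          obtain ⟨h2, t2, rfl⟩ := List.exists_cons_of_ne_nil hte
          have hnds : (([h] : List Int) ++ h2 :: t2).Nodup := by simpa using hnd
          have hposs : ∀ v ∈ ([h] : List Int) ++ h2 :: t2, 1 ≤ c.getD v 0 := by simpa using hpos
          obtain ⟨r1, r2, r3, r4⟩ := pvRemoval c h2 [h] t2 hnds hposs
          simp only [List.cons_append, List.nil_append] at r1 r2 r3 r4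
          have hne : h2 ≠ x := by
            intro hc
            have hh : h = h2 := by rw [hhx, ← hc]
            exact (List.nodup_cons.mp hnd).1 (by rw [hh]; simp)
          have hx' : ¬ PySem.Int.bxor x h2 = 0 :=
            fun hc => hne ((pvBxor_eq_zero_iff x h2).mp hc).symm
          rw [dwLoop_step1 fuel h h2 t2 c x p hx0 hhx]
          rw [ih _ _ _ _ r1 r2 (by rw [hx]; exact r3.symm)
            (by rw [r4]; push_cast at hfuel ⊢; omega)]
          rw [r4]
          exact pvParity_step x (PySem.Int.bxor x h2) _ p hx0 (fun hc => absurd hc hx')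
        · -- removed_idx = 0: the first distinct number is removed
          have hnds : (([] : List Int) ++ h :: t).Nodup := by simpa using hnd
          have hposs : ∀ v ∈ ([] : List Int) ++ h :: t, 1 ≤ c.getD v 0 := by simpa using hpos
          obtain ⟨r1, r2, r3, r4⟩ := pvRemoval c h [] t hnds hposs
          simp only [List.nil_append] at r1 r2 r3 r4
          have hkey : PySem.Int.bxor x h = 0 → ¬ 2 ∣ pvTot (h :: t) (fun v => c.getD v 0) := by
            intro hc
            have hxh : x = h := (pvBxor_eq_zero_iff x h).mp hc
            have htnil : t = [] := by
              by_contra htne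
              exact hsw ⟨hxh.symm, htne⟩
            subst htnil
            have hxc : x = pvContrib (fun v => c.getD v 0) h := by
              rw [hx, pvXorM_cons, pvXorM_nil, PySem.Int.bxor_zero]
            have hm : PySem.Int.mod (c.getD h 0) 2 = 1 := by
              by_contra hm
              have hz : pvContrib (fun v => c.getD v 0) h = 0 := by
                simp only [pvContrib, if_neg hm]
              exact hx0 (by rw [hxc, hz])
            have hodd := pvMod2_odd _ hm
            rw [pvTot_cons, pvTot_nil]
            omega
          rw [dwLoop_step0 fuel h t c x p hx0 hsw]
          rw [ih _ _ _ _ r1 r2 (by rw [hx]; exact r3.symm)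
            (by rw [r4]; push_cast at hfuel ⊢; omega)]
          rw [r4]
          exact pvParity_step x (PySem.Int.bxor x h) _ p hx0 hkey

-- -------- the first loop establishes the invariant --------
def pvInv (acc : Int × PySem.Dict Int Int × List Int) (q : List Int) : Prop :=
  acc.1 = q.foldl PySem.Int.bxor 0 ∧
  acc.2.2 = PySem.Set.ofList q ∧
  (∀ v : Int, acc.2.1.getD v 0 = (q.count v : Int)) ∧
  (∀ v : Int, acc.2.1.contains v = decide (v ∈ q))

theorem pvFold_inv (l : List Int) : ∀ (acc : Int × PySem.Dict Int Int × List Int) (q : List Int),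
    pvInv acc q → pvInv (l.foldl dwStep acc) (q ++ l) := by
  induction l with
  | nil => intro acc q h; simpa using h
  | cons n l ih =>
    intro acc q hI
    obtain ⟨i1, i2, i3, i4⟩ := hI
    have hstep : pvInv (dwStep acc n) (q ++ [n]) := by
      unfold dwStep pvInv
      by_cases hn : n ∈ q
      · have hc : acc.2.1.contains n = true := by rw [i4]; simp [hn]
        simp only [hc, if_true]
        refine ⟨?_, ?_, ?_, ?_⟩
        · rw [List.foldl_append, ← i1]; rfl
        · rw [PySem.Set.ofList_append_singleton,
            PySem.Set.add_of_mem ((PySem.Set.mem_ofList q n).mpr hn), i2]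
        · intro v
          rw [PySem.Dict.getD_modify, List.count_append]
          by_cases hv : v = n
          · subst hv; simp [i3, List.count_cons]
          · simp [hv, i3, List.count_cons, Ne.symm hv]
        · intro v
          rw [PySem.Dict.contains_modify, i4]
          by_cases hv : v = n
          · subst hv; simp
          · simp [hv]
      · have hc : acc.2.1.contains n = false := by rw [i4]; simp [hn]
        simp only [hc, if_false, Bool.false_eq_true]
        refine ⟨?_, ?_, ?_, ?_⟩
        · rw [List.foldl_append, ← i1]; rfl
        · rw [PySem.Set.ofList_append_singleton,
            PySem.Set.add_of_not_mem (fun h => hn ((PySem.Set.mem_ofList q n).mp h)), i2]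
        · intro v
          rw [PySem.Dict.getD_modify, List.count_append]
          by_cases hv : v = n
          · subst hv
            rw [if_pos rfl, PySem.Dict.getD_insert_self]
            have hz : q.count v = 0 := List.count_eq_zero_of_not_mem hn
            simp [hz, List.count_cons]
          · rw [if_neg hv, PySem.Dict.getD_insert, if_neg hv, i3]
            simp [List.count_cons, Ne.symm hv]
        · intro v
          rw [PySem.Dict.contains_modify, PySem.Dict.contains_insert, i4]
          by_cases hv : v = n
          · subst hv; simp
          · simp [hv]
    have := ih (dwStep acc n) (q ++ [n]) hstep
    simpa using this

-- -------- link: xor/total over (distinct list, counts) vs the raw input list --------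
theorem pvLink (xs : List Int) :
    pvXorM (PySem.Set.ofList xs) (fun v => (xs.count v : Int)) = xs.foldl PySem.Int.bxor 0 ∧
    pvTot (PySem.Set.ofList xs) (fun v => (xs.count v : Int)) = (xs.length : Int) := by
  induction xs using List.reverseRecOn with
  | nil => exact ⟨rfl, rfl⟩
  | append_singleton xs n ih =>
    obtain ⟨ihX, ihT⟩ := ih
    have hcount : ∀ v : Int, (((xs ++ [n]).count v : Int))
        = if v = n then (xs.count v : Int) + 1 else (xs.count v : Int) := by
      intro v
      by_cases hv : v = n
      · subst hv; simp [List.count_append]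
      · simp [List.count_append, hv, Ne.symm hv]
    have hfold : (xs ++ [n]).foldl PySem.Int.bxor 0
        = PySem.Int.bxor (xs.foldl PySem.Int.bxor 0) n := by
      rw [List.foldl_append]; rfl
    rw [PySem.Set.ofList_append_singleton]
    by_cases hn : n ∈ xs
    · rw [PySem.Set.add_of_mem ((PySem.Set.mem_ofList xs n).mpr hn)]
      have hnset : n ∈ PySem.Set.ofList xs := (PySem.Set.mem_ofList xs n).mpr hn
      obtain ⟨d1, d2, hsplit⟩ := List.append_of_mem hnset
      have hnd : (PySem.Set.ofList xs).Nodup := PySem.Set.nodup_ofList xs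
      rw [hsplit] at hnd
      have hndsplit := hnd
      rw [List.nodup_append] at hndsplit
      obtain ⟨hnd1, hnd2c, hdisj⟩ := hndsplit
      have hn1 : n ∉ d1 := fun h => hdisj n h n (by simp) rfl
      have hn2 : n ∉ d2 := (List.nodup_cons.mp hnd2c).1
      have hg1X : pvXorM d1 (fun v => ((xs ++ [n]).count v : Int)) = pvXorM d1 (fun v => (xs.count v : Int)) :=
        pvXorM_congr _ _ _ (fun v hv => by
          rw [hcount v, if_neg (show ¬ (v = n) from fun h => hn1 (h ▸ hv))])
      have hg2X : pvXorM d2 (fun v => ((xs ++ [n]).count v : Int)) = pvXorM d2 (fun v => (xs.count v : Int)) :=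
        pvXorM_congr _ _ _ (fun v hv => by
          rw [hcount v, if_neg (show ¬ (v = n) from fun h => hn2 (h ▸ hv))])
      have hg1T : pvTot d1 (fun v => ((xs ++ [n]).count v : Int)) = pvTot d1 (fun v => (xs.count v : Int)) :=
        pvTot_congr _ _ _ (fun v hv => by
          rw [hcount v, if_neg (show ¬ (v = n) from fun h => hn1 (h ▸ hv))])
      have hg2T : pvTot d2 (fun v => ((xs ++ [n]).count v : Int)) = pvTot d2 (fun v => (xs.count v : Int)) :=
        pvTot_congr _ _ _ (fun v hv => by
          rw [hcount v, if_neg (show ¬ (v = n) from fun h => hn2 (h ▸ hv))])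
      have hflip : pvContrib (fun v => ((xs ++ [n]).count v : Int)) n
          = PySem.Int.bxor (pvContrib (fun v => (xs.count v : Int)) n) n := by
        simp only [pvContrib, hcount n, if_pos rfl]
        exact pvContrib_flip_up ((xs.count n : Int)) n
      rw [hsplit] at ihX ihT
      constructor
      · have e1 : pvXorM (d1 ++ n :: d2) (fun v => ((xs ++ [n]).count v : Int))
            = PySem.Int.bxor (pvXorM (d1 ++ n :: d2) (fun v => (xs.count v : Int))) n := by
          rw [pvXorM_append, pvXorM_append, pvXorM_cons, pvXorM_cons, hg1X, hg2X, hflip]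
          simp only [pvBxor_assoc, pvBxor_left_comm, PySem.Int.bxor_comm, pvBxor_cancel,
            PySem.Int.bxor_self, PySem.Int.bxor_zero, pvBxor_zero_left]
        rw [hsplit, e1, ihX, hfold]
      · have e2 : pvTot (d1 ++ n :: d2) (fun v => ((xs ++ [n]).count v : Int))
            = pvTot (d1 ++ n :: d2) (fun v => (xs.count v : Int)) + 1 := by
          rw [pvTot_append, pvTot_append, pvTot_cons, pvTot_cons, hg1T, hg2T, hcount n, if_pos rfl]
          ring
        rw [hsplit, e2, ihT]
        simp only [List.length_append, List.length_cons, List.length_nil]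
        push_cast
        ring
    · rw [PySem.Set.add_of_not_mem (fun h => hn ((PySem.Set.mem_ofList xs n).mp h))]
      have hgX : pvXorM (PySem.Set.ofList xs) (fun v => ((xs ++ [n]).count v : Int))
          = pvXorM (PySem.Set.ofList xs) (fun v => (xs.count v : Int)) :=
        pvXorM_congr _ _ _ (fun v hv => by
          rw [hcount v, if_neg (show ¬ (v = n) from fun h => hn (h ▸ (PySem.Set.mem_ofList xs v).mp hv))])
      have hgT : pvTot (PySem.Set.ofList xs) (fun v => ((xs ++ [n]).count v : Int))
          = pvTot (PySem.Set.ofList xs) (fun v => (xs.count v : Int)) :=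
        pvTot_congr _ _ _ (fun v hv => by
          rw [hcount v, if_neg (show ¬ (v = n) from fun h => hn (h ▸ (PySem.Set.mem_ofList xs v).mp hv))])
      have hcn : ((xs ++ [n]).count n : Int) = 1 := by
        simp [List.count_append, List.count_eq_zero_of_not_mem hn]
      have hm1 : PySem.Int.mod (1 : Int) 2 = 1 := by decide
      have hcontr : pvContrib (fun v => ((xs ++ [n]).count v : Int)) n = n := by
        show (if PySem.Int.mod (((xs ++ [n]).count n : Int)) 2 = 1 then n else 0) = n
        rw [hcn, hm1]
        simp
      constructor
      · rw [pvXorM_append, pvXorM_cons, pvXorM_nil, hgX, hcontr, PySem.Int.bxor_zero, ihX, hfold]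
      · rw [pvTot_append, pvTot_cons, pvTot_nil, hgT, ihT, hcn]
        simp only [List.length_append, List.length_cons, List.length_nil]
        push_cast
        ring

-- ===== VERDICT (by name: the statement is the Claim_ definition above) =====
theorem determine_winner_spec : Claim_equal_determine_winner := by
  intro numbers _
  unfold Spec_determine_winner determine_winner determine_winner_alt
  show dwLoop numbers.length (numbers.foldl dwStep (0, PySem.Dict.empty, [])).2.2
      (numbers.foldl dwStep (0, PySem.Dict.empty, [])).2.1
      (numbers.foldl dwStep (0, PySem.Dict.empty, [])).1 0 = _
  have hinv := pvFold_inv numbers (0, PySem.Dict.empty, []) []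
    (by
      refine ⟨rfl, rfl, ?_, ?_⟩ <;> intro v
      · simp [PySem.Dict.getD_empty]
      · simp [PySem.Dict.contains_empty])
  simp only [List.nil_append] at hinv
  set acc := numbers.foldl dwStep (0, PySem.Dict.empty, []) with hacc
  obtain ⟨h1, h2, h3, h4⟩ := hinv
  obtain ⟨hlX, hlT⟩ := pvLink numbers
  have hf : (fun v => acc.2.1.getD v 0) = (fun v => (numbers.count v : Int)) := funext h3
  rw [dwLoop_spec numbers.length acc.2.2 acc.2.1 acc.1 0
      (by rw [h2]; exact PySem.Set.nodup_ofList numbers)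
      (by
        intro v hv
        rw [h3]
        have hvm : v ∈ numbers := by
          rw [h2] at hv; exact (PySem.Set.mem_ofList numbers v).mp hv
        have := List.count_pos_iff.mpr hvm
        omega)
      (by rw [h1, h2, hf, hlX])
      (by rw [h2, hf, hlT])]
  rw [h2, hf, hlT, h1]
  have hm0 : decide (PySem.Int.mod (0 : Int) 2 = 0) = true := by decide
  have hdvd : (2 ∣ (numbers.length : Int)) ↔ PySem.Int.mod (numbers.length : Int) 2 = 0 :=
    (PySem.Int.mod_eq_zero_iff_dvd _ _).symm
  rw [hm0, show ∀ b : Bool, (b == true) = b from fun b => by cases b <;> rfl]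
  by_cases hz : List.foldl PySem.Int.bxor 0 numbers = 0
  · simp [hz]
  · by_cases he : PySem.Int.mod (numbers.length : Int) 2 = 0
    · have he' : 2 ∣ (numbers.length : Int) := hdvd.mpr he
      simp [hz, he, he']
    · have he' : ¬ 2 ∣ (numbers.length : Int) := fun hc => he (hdvd.mp hc)
      simp [hz, he, he']
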